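-- pv_equiv track=rewrite | github.com/pietromarcogallo/eHealthProject | weight_assignment.py | count_occurrences_and_spot_keywords
-- ===== SOURCE A (Python) =====
-- def count_occurrences_and_spot_keywords(occurrence, is_keyword, keywords, text, black_list):
--     words = text.split()
--     for word in words:
--         # Put all words in lower case, because so do they appear in the black list in the .xlsx file
--         word = word.lower()
--         if word not in black_list:
--             occurrence[word] = occurrence[word] + 1 if word in occurrence else 1
--             # The value of each key in is_keyword is a boolean: is the word in question a keyword of the article's?
--             is_keyword[word] = word in keywords
--     return occurrence, is_keyword
-- ===== SOURCE B (Python) =====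
-- def count_occurrences_and_spot_keywords(occurrence, is_keyword, keywords, text, black_list):
--     # Worklist elimination: repeatedly take the first remaining filtered word, count and
--     # remove ALL its occurrences at once, touching each dict once per distinct word.
--     ws = [w for w in (t.lower() for t in text.split()) if w not in black_list]
--     while ws:
--         w = ws[0]
--         occurrence[w] = occurrence.get(w, 0) + ws.count(w)
--         is_keyword[w] = w in keywords
--         ws = [x for x in ws[1:] if x != w]
--     return occurrence, is_keyword
-- ===== Notes on version B (the rewrite author's own statement) =====
-- stated objective: alternative
-- what changed: A makes one interleaved pass over every word occurrence, conditionally incrementing occurrence and re-setting is_keyword per token; B builds the filtered lowercased worklist and then repeatedly extracts the first remaining word, counting and removing ALL its occurrences at once, so each dict is updated exactly once per distinct word.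
import Mathlib
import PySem

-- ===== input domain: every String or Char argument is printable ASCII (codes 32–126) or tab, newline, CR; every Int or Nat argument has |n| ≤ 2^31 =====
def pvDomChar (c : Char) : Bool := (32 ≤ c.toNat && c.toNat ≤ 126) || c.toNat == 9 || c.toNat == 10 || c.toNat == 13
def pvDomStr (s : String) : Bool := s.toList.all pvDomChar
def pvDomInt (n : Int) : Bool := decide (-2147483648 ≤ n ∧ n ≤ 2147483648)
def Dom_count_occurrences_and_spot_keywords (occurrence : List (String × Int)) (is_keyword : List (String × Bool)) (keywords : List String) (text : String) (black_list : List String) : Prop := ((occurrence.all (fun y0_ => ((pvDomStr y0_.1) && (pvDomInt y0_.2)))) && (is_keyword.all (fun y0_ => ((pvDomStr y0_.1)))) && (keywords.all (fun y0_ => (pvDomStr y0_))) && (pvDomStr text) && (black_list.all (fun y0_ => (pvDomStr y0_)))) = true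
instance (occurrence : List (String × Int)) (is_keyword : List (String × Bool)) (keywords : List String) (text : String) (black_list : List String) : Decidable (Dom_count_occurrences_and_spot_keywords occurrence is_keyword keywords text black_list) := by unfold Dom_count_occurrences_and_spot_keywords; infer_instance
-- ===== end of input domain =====

-- B replaces A's single interleaved per-occurrence pass by worklist elimination: from the
-- filtered lowercased word list it repeatedly takes the first remaining word, counts and
-- removes ALL its occurrences at once, updating each dict once per distinct word (objective:
-- alternative algorithm, similar cost). Python A and B mutate the two dict arguments in place
-- identically; the equivalence proved here is about the return value.

-- ===== PORT A =====
def count_occurrences_and_spot_keywords (occurrence : List (String × Int)) (is_keyword : List (String × Bool)) (keywords : List String) (text : String) (black_list : List String) : (List (String × Int)) × (List (String × Bool)) :=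
  let st := (PySem.Str.split₀ text).foldl
    (fun (st : PySem.Dict String Int × PySem.Dict String Bool) word =>
      let w := PySem.Str.lower word
      if black_list.contains w then st
      else (st.1.insert w (if st.1.contains w then st.1.getD w 0 + 1 else 1),
            st.2.insert w (keywords.contains w)))
    (PySem.Dict.mk occurrence, PySem.Dict.mk is_keyword)
  (st.1.items, st.2.items)

-- ===== PORT B =====
-- the `while ws:` worklist-elimination loop of Source B
def pvLoopB (keywords : List String) (ws : List String)
    (occ : PySem.Dict String Int) (isk : PySem.Dict String Bool) :
    (List (String × Int)) × (List (String × Bool)) :=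
  match ws with
  | [] => (occ.items, isk.items)
  | w :: t =>
    pvLoopB keywords (t.filter (fun x => x != w))
      (occ.insert w (occ.getD w 0 + ((w :: t).count w : Int)))
      (isk.insert w (keywords.contains w))
termination_by ws.length
decreasing_by simpa using Nat.lt_succ_of_le (List.length_filter_le _ _)

def count_occurrences_and_spot_keywords_alt (occurrence : List (String × Int)) (is_keyword : List (String × Bool)) (keywords : List String) (text : String) (black_list : List String) : (List (String × Int)) × (List (String × Bool)) :=
  let ws := ((PySem.Str.split₀ text).map PySem.Str.lower).filter (fun w => !(black_list.contains w))
  pvLoopB keywords ws (PySem.Dict.mk occurrence) (PySem.Dict.mk is_keyword)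

-- ===== PRECONDITION & SPEC =====
def Spec_count_occurrences_and_spot_keywords (occurrence : List (String × Int)) (is_keyword : List (String × Bool)) (keywords : List String) (text : String) (black_list : List String) (out : (List (String × Int)) × (List (String × Bool))) : Prop := out = count_occurrences_and_spot_keywords_alt occurrence is_keyword keywords text black_list
instance (occurrence : List (String × Int)) (is_keyword : List (String × Bool)) (keywords : List String) (text : String) (black_list : List String) (out : (List (String × Int)) × (List (String × Bool))) : Decidable (Spec_count_occurrences_and_spot_keywords occurrence is_keyword keywords text black_list out) := by unfold Spec_count_occurrences_and_spot_keywords; infer_instance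

-- ===== CLAIM (what is proved, stated in full; the proofs are below) =====
def Claim_equal_count_occurrences_and_spot_keywords : Prop := ∀ (occurrence : List (String × Int)) (is_keyword : List (String × Bool)) (keywords : List String) (text : String) (black_list : List String), Dom_count_occurrences_and_spot_keywords occurrence is_keyword keywords text black_list → Spec_count_occurrences_and_spot_keywords occurrence is_keyword keywords text black_list (count_occurrences_and_spot_keywords occurrence is_keyword keywords text black_list)

-- ===== LEMMAS AND PROOFS =====

-- Two in-place inserts at distinct keys commute when the first key is already present.
lemma dict_insert_comm {ν : Type} (d : PySem.Dict String ν) (w k : String) (x z : ν)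
    (hw : w ∈ d.keys) (hk : k ≠ w) :
    (d.insert w x).insert k z = (d.insert k z).insert w x := by
  have hcw : d.contains w = true := (PySem.Dict.contains_iff_mem_keys d w).mpr hw
  apply PySem.Dict.ext
  by_cases hck : d.contains k = true
  · rw [PySem.Dict.items_insert_of_contains _ z (by simp [PySem.Dict.contains_insert, hck]),
        PySem.Dict.items_insert_of_contains _ x hcw,
        PySem.Dict.items_insert_of_contains _ x (by simp [PySem.Dict.contains_insert, hcw]),
        PySem.Dict.items_insert_of_contains _ z hck]
    simp only [List.map_map]
    apply List.map_congr_left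
    intro p _
    by_cases h1 : p.1 = w
    · simp [Function.comp, h1, Ne.symm hk]
    · by_cases h2 : p.1 = k <;> simp [Function.comp, h1, h2, hk]
  · have hck' : d.contains k = false := by simpa using hck
    rw [PySem.Dict.items_insert_of_not_contains _ z (by simp [PySem.Dict.contains_insert, hck', hk]),
        PySem.Dict.items_insert_of_contains _ x hcw,
        PySem.Dict.items_insert_of_contains _ x (by simp [PySem.Dict.contains_insert, hcw]),
        PySem.Dict.items_insert_of_not_contains _ z hck']
    simp [hk]

-- A's interleaved filtered pass over a pair of dicts is the two independent per-occurrence passes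
-- over the filtered lowercased word list.
lemma a_fold_split (kwds bl : List String) (ws : List String) :
    ∀ (occ : PySem.Dict String Int) (isk : PySem.Dict String Bool),
    ws.foldl
      (fun (st : PySem.Dict String Int × PySem.Dict String Bool) word =>
        let w := PySem.Str.lower word
        if bl.contains w then st
        else (st.1.insert w (if st.1.contains w then st.1.getD w 0 + 1 else 1),
              st.2.insert w (kwds.contains w))) (occ, isk)
      = (((ws.map PySem.Str.lower).filter (fun w => !(bl.contains w))).foldl
            (fun o w => o.insert w (o.getD w 0 + 1)) occ,
         ((ws.map PySem.Str.lower).filter (fun w => !(bl.contains w))).foldl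
            (fun o w => o.insert w (kwds.contains w)) isk) := by
  induction ws with
  | nil => intro occ isk; rfl
  | cons word t ih =>
    intro occ isk
    simp only [List.foldl_cons, List.map_cons, List.filter_cons]
    by_cases hb : bl.contains (PySem.Str.lower word) = true
    · simp only [hb, if_true, Bool.not_true]
      exact ih occ isk
    · have hb' : bl.contains (PySem.Str.lower word) = false := by simpa using hb
      simp only [hb', Bool.not_false]
      rw [ih]
      by_cases hc : occ.contains (PySem.Str.lower word) = true
      · simp [hc]
      · have hc' : occ.contains (PySem.Str.lower word) = false := by simpa using hc
        simp [hc', PySem.Dict.getD_of_not_contains _ _ hc']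

-- Extracting all occurrences of a stably-present key w: the per-occurrence +1 fold over t equals
-- bumping w once by t's tally and folding over t with w's occurrences removed.
lemma occ_extract (t : List String) :
    ∀ (d : PySem.Dict String Int) (w : String), w ∈ d.keys →
    d.insert w (d.getD w 0) = d →
    t.foldl (fun o k => o.insert k (o.getD k 0 + 1)) d
      = (t.filter (fun x => x != w)).foldl (fun o k => o.insert k (o.getD k 0 + 1))
          (d.insert w (d.getD w 0 + (t.count w : Int))) := by
  induction t with
  | nil =>
    intro d w _ hst
    simpa using hst.symm
  | cons x t ih =>
    intro d w hw hst
    simp only [List.foldl_cons, List.filter_cons]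
    by_cases hxw : x = w
    · subst hxw
      rw [ih (d.insert x (d.getD x 0 + 1)) x ((PySem.Dict.mem_keys_insert ..).mpr (Or.inl rfl))
            (by rw [PySem.Dict.getD_insert_self, PySem.Dict.insert_insert_self]),
          PySem.Dict.getD_insert_self, PySem.Dict.insert_insert_self]
      simp only [bne_self_eq_false, Bool.false_eq_true, if_false, List.count_cons_self]
      congr 2
      push_cast; omega
    · have hne : (x != w) = true := by simpa using hxw
      have hcnt : (x :: t).count w = t.count w := by
        simp [hxw]
      rw [ih (d.insert x (d.getD x 0 + 1)) w ((PySem.Dict.mem_keys_insert ..).mpr (Or.inr hw))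
            (by rw [PySem.Dict.getD_insert_of_ne _ _ _ (Ne.symm hxw),
                    ← dict_insert_comm d w x _ _ hw hxw, hst]),
          PySem.Dict.getD_insert_of_ne _ _ _ (Ne.symm hxw),
          ← dict_insert_comm d w x _ _ hw hxw, hcnt]
      simp [hne, PySem.Dict.getD_insert_of_ne _ _ _ hxw]

-- The keyword-flag fold ignores later occurrences of a stably-flagged word.
lemma isk_extract (kwds : List String) (t : List String) :
    ∀ (d : PySem.Dict String Bool) (w : String), w ∈ d.keys →
    d.insert w (kwds.contains w) = d →
    t.foldl (fun o k => o.insert k (kwds.contains k)) d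
      = (t.filter (fun x => x != w)).foldl (fun o k => o.insert k (kwds.contains k)) d := by
  induction t with
  | nil => intro d w _ _; rfl
  | cons x t ih =>
    intro d w hw hst
    simp only [List.foldl_cons, List.filter_cons]
    by_cases hxw : x = w
    · subst hxw
      simp only [bne_self_eq_false, Bool.false_eq_true, if_false]
      rw [hst]
      exact ih d x hw hst
    · have hne : (x != w) = true := by simpa using hxw
      rw [if_pos hne]
      simp only [List.foldl_cons]
      exact ih (d.insert x (kwds.contains x)) w
        ((PySem.Dict.mem_keys_insert ..).mpr (Or.inr hw))
        (by rw [← dict_insert_comm d w x _ _ hw hxw, hst])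

-- B's worklist loop computes exactly the two per-occurrence folds A reduces to.
lemma loopB_eq (kwds : List String) (ws : List String) :
    ∀ (occ : PySem.Dict String Int) (isk : PySem.Dict String Bool),
    pvLoopB kwds ws occ isk
      = ((ws.foldl (fun o k => o.insert k (o.getD k 0 + 1)) occ).items,
         (ws.foldl (fun o k => o.insert k (kwds.contains k)) isk).items) := by
  cases ws with
  | nil => intro occ isk; rw [pvLoopB]; rfl
  | cons w t =>
    intro occ isk
    rw [pvLoopB, loopB_eq kwds (t.filter (fun x => x != w))]
    simp only [List.foldl_cons]
    have hocc := occ_extract t (occ.insert w (occ.getD w 0 + 1)) w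
      ((PySem.Dict.mem_keys_insert ..).mpr (Or.inl rfl))
      (by rw [PySem.Dict.getD_insert_self, PySem.Dict.insert_insert_self])
    rw [PySem.Dict.getD_insert_self, PySem.Dict.insert_insert_self] at hocc
    have hisk := isk_extract kwds t (isk.insert w (kwds.contains w)) w
      ((PySem.Dict.mem_keys_insert ..).mpr (Or.inl rfl))
      (by rw [PySem.Dict.insert_insert_self])
    have harith : occ.getD w 0 + (((w :: t).count w : Nat) : Int)
        = occ.getD w 0 + 1 + ((t.count w : Nat) : Int) := by
      push_cast [List.count_cons_self]; ring
    rw [harith, hocc, hisk]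
termination_by ws.length
decreasing_by simpa using Nat.lt_succ_of_le (List.length_filter_le _ _)

-- ===== VERDICT (by name: the statement is the Claim_ definition above) =====
theorem count_occurrences_and_spot_keywords_spec : Claim_equal_count_occurrences_and_spot_keywords := by
  intro occurrence is_keyword keywords text black_list _
  unfold Spec_count_occurrences_and_spot_keywords count_occurrences_and_spot_keywords
    count_occurrences_and_spot_keywords_alt
  simp only []
  rw [a_fold_split keywords black_list (PySem.Str.split₀ text)
        (PySem.Dict.mk occurrence) (PySem.Dict.mk is_keyword),
      loopB_eq]
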